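-- pv_equiv track=rewrite | github.com/sysbio-curie/NaviCell | auxiliary_scripts/Module_staining.py | Get_genes_modules_gmt
-- ===== SOURCE A (Python) =====
-- def Get_genes_modules_gmt(gmt_dict):
--
-- 	gene_dict = {}
--
-- 	for mod in gmt_dict:
--
-- 		for gene in gmt_dict[mod]:
--
-- 			if gene not in gene_dict:
--
-- 				gene_dict[gene] = [mod]
--
-- 			elif mod not in gene_dict[gene]:
--
-- 				gene_dict[gene].append(mod)
--
-- 	return gene_dict
-- ===== SOURCE B (Python) =====
-- def Get_genes_modules_gmt(gmt_dict):
-- 	# Precompute each module's gene set for O(1) membership.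
-- 	items = [(mod, set(gs)) for mod, gs in gmt_dict.items()]
-- 	# All distinct genes, in first-occurrence order.
-- 	genes = dict.fromkeys(g for gs in gmt_dict.values() for g in gs)
-- 	# Transpose directly: each gene maps to the modules whose gene set mentions it,
-- 	# in dict order; no incremental dict building, no guarded appends.
-- 	return {gene: [mod for mod, gset in items if gene in gset] for gene in genes}
-- ===== Notes on version B (the rewrite author's own statement) =====
-- stated objective: alternative
-- what changed: B computes the transpose directly instead of building it incrementally: it precomputes each module's gene set, derives the ordered distinct gene list with dict.fromkeys over the flattened gene stream, then extracts each gene's module column by one comprehension scan over the modules, replacing A's row-wise loop that mutates a growing dict with guarded inserts/appends; Pre_ only requires the association-list argument to have distinct keys, i.e. to denote an actual Python dict.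
import Mathlib
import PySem

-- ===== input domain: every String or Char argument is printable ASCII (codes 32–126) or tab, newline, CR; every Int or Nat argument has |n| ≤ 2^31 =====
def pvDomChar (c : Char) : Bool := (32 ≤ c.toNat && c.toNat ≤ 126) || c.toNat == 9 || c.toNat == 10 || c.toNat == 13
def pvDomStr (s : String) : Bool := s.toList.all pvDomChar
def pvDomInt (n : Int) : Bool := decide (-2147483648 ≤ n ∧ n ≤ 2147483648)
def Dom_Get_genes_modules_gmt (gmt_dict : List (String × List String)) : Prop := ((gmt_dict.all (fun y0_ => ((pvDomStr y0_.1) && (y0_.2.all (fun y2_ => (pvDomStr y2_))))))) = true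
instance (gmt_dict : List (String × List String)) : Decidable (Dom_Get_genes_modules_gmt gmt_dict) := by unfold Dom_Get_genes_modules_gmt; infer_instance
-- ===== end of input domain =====

-- B computes the transpose directly (ordered distinct gene list, then one column scan per
-- gene) instead of A's incremental row-wise dict building; objective: alternative
-- decomposition, no speed claim. Return value only.

-- ===== PORT A =====
-- A: for mod in gmt_dict: for gene in gmt_dict[mod]: guarded insert/append.
-- 'gmt_dict[mod]' is a first-match lookup ((List.lookup …).getD []); under Pre_ (distinct keys)
-- the key is always present, so the default is never used.
def Get_genes_modules_gmt (gmt_dict : List (String × List String)) : List (String × List String) :=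
  (gmt_dict.foldl
    (fun d p =>
      ((List.lookup p.1 gmt_dict).getD []).foldl
        (fun d gene =>
          if d.contains gene = false then d.insert gene [p.1]
          else if p.1 ∉ d.getD gene [] then d.modify gene [] (fun v => v ++ [p.1])
          else d)
        d)
    PySem.Dict.empty).items

-- ===== PORT B =====
-- B: items = [(mod, set(gs)) …] (set(gs) = PySem.Set.ofList gs);
-- genes = dict.fromkeys(flattened gene stream) = PySem.List.dedup (flatMap);
-- then a dict comprehension mapping each gene to its module column
-- [mod for mod, gset in items if gene in gset].
def Get_genes_modules_gmt_alt (gmt_dict : List (String × List String)) : List (String × List String) :=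
  let items := gmt_dict.map (fun p => (p.1, PySem.Set.ofList p.2))
  let genes := PySem.List.dedup (gmt_dict.flatMap (fun p => p.2))
  genes.map (fun gene =>
    (gene, (items.filter (fun q => q.2.contains gene)).map (fun q => q.1)))

-- ===== PRECONDITION & SPEC =====
-- Pre_ excludes association lists with duplicate module keys: those do not denote a Python dict
-- (a dict cannot hold two entries with the same key), so the behaviour of the list-level ports
-- there corresponds to no Python run.
def Pre_Get_genes_modules_gmt (gmt_dict : List (String × List String)) : Prop :=
  (gmt_dict.map Prod.fst).Nodup
instance (gmt_dict : List (String × List String)) : Decidable (Pre_Get_genes_modules_gmt gmt_dict) := by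
  unfold Pre_Get_genes_modules_gmt; infer_instance

def pvWitness_Get_genes_modules_gmt : (List (String × List String)) :=
  [("m1", ["g1", "g2"]), ("m2", ["g2"])]

def Spec_Get_genes_modules_gmt (gmt_dict : List (String × List String)) (out : List (String × List String)) : Prop := out = Get_genes_modules_gmt_alt gmt_dict
instance (gmt_dict : List (String × List String)) (out : List (String × List String)) : Decidable (Spec_Get_genes_modules_gmt gmt_dict out) := by unfold Spec_Get_genes_modules_gmt; infer_instance

-- ===== CLAIM (what is proved, stated in full; the proofs are below) =====
def Claim_equal_Get_genes_modules_gmt : Prop := ∀ (gmt_dict : List (String × List String)), Dom_Get_genes_modules_gmt gmt_dict → Pre_Get_genes_modules_gmt gmt_dict → Spec_Get_genes_modules_gmt gmt_dict (Get_genes_modules_gmt gmt_dict)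

-- ===== LEMMAS AND PROOFS =====

-- With distinct keys, the lookup A performs returns the pair's own value list.
theorem lookup_self_of_nodup {l : List (String × List String)}
    (hnd : (l.map Prod.fst).Nodup) {p : String × List String} (hp : p ∈ l) :
    List.lookup p.1 l = some p.2 := by
  induction l with
  | nil => cases hp
  | cons q l ih =>
    simp only [List.map, List.nodup_cons] at hnd
    rcases List.mem_cons.mp hp with rfl | hp
    · simp [List.lookup]
    · have hne : (p.1 == q.1) = false := by
        simp only [beq_eq_false_iff_ne]
        intro h
        exact hnd.1 (h ▸ List.mem_map_of_mem hp)
      simp [List.lookup, hne, ih hnd.2 hp]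

-- dedup of a one-element extension.
theorem dedup_append_singleton {α : Type} [DecidableEq α] (v : List α) (a : α) :
    PySem.List.dedup (v ++ [a]) =
      if a ∈ v then PySem.List.dedup v else PySem.List.dedup v ++ [a] := by
  simp only [PySem.List.dedup_eq_ofList, PySem.Set.ofList_append_singleton]
  show (if (PySem.Set.ofList v).contains a then PySem.Set.ofList v
        else PySem.Set.ofList v ++ [a]) = _
  by_cases h : a ∈ v <;>
    simp [PySem.Set.contains, PySem.Set.mem_ofList, h]

-- A's inner fold over one module's gene list: value characterisation.
theorem inner_getD (m : String) (gs : List String) :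
    ∀ (d : PySem.Dict String (List String)) (x : String),
      ((gs.foldl
          (fun d gene =>
            if d.contains gene = false then d.insert gene [m]
            else if m ∉ d.getD gene [] then d.modify gene [] (fun v => v ++ [m])
            else d) d).getD x []) =
      if x ∈ gs ∧ m ∉ d.getD x [] then d.getD x [] ++ [m] else d.getD x [] := by
  induction gs with
  | nil => intro d x; simp
  | cons g rest ih =>
    intro d x
    simp only [List.foldl_cons]
    have hstep :
        (if d.contains g = false then d.insert g [m]
         else if m ∉ d.getD g [] then d.modify g [] (fun v => v ++ [m])
         else d).getD x [] =
        if x = g ∧ m ∉ d.getD g [] then d.getD g [] ++ [m] else d.getD x [] := by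
      by_cases hc : d.contains g = false
      · rw [if_pos hc, PySem.Dict.getD_insert]
        have hg : d.getD g [] = [] := PySem.Dict.getD_of_not_contains _ _ hc
        by_cases hx : x = g
        · subst hx; simp [hg]
        · simp [hx]
      · rw [if_neg hc]
        by_cases hm : m ∈ d.getD g []
        · rw [if_neg (by simp [hm])]
          by_cases hx : x = g
          · subst hx; simp [hm]
          · simp [hx, hm]
        · rw [if_pos hm, PySem.Dict.getD_modify]
          by_cases hx : x = g
          · subst hx; simp [hm]
          · simp [hx]
    rw [ih, hstep]
    by_cases hx : x = g
    · subst hx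
      by_cases hm : m ∈ d.getD x []
      · simp [hm]
      · simp [hm]
    · simp only [if_neg (by simp [hx] : ¬(x = g ∧ m ∉ d.getD g []))]
      by_cases hr : x ∈ rest
      · simp [hx, hr]
      · simp [hx, hr]

-- A's inner fold over one module's gene list: key characterisation.
theorem inner_keys (m : String) (gs : List String) :
    ∀ (d : PySem.Dict String (List String)),
      ((gs.foldl
          (fun d gene =>
            if d.contains gene = false then d.insert gene [m]
            else if m ∉ d.getD gene [] then d.modify gene [] (fun v => v ++ [m])
            else d) d).keys) =
      gs.foldl (fun K g => if g ∈ K then K else K ++ [g]) d.keys := by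
  induction gs with
  | nil => intro d; rfl
  | cons g rest ih =>
    intro d
    simp only [List.foldl_cons]
    rw [ih]
    congr 1
    by_cases hc : d.contains g = false
    · have hg : g ∉ d.keys := by
        rw [PySem.Dict.contains_eq_decide_mem_keys] at hc
        simpa using hc
      rw [if_pos hc, PySem.Dict.keys_insert_of_not_contains _ _ hc, if_neg hg]
    · have hc' : d.contains g = true := by
        cases h : d.contains g
        · exact absurd h hc
        · rfl
      have hg : g ∈ d.keys := by
        rw [PySem.Dict.contains_eq_decide_mem_keys] at hc'
        simpa using hc'
      rw [if_neg hc, if_pos hg]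
      by_cases hm : m ∈ d.getD g []
      · rw [if_neg (by simp [hm])]
      · rw [if_pos hm, PySem.Dict.keys_modify, PySem.Dict.keys_insert_of_contains _ _ hc']

-- folding the conditional-append over a dedup'd accumulator is dedup of the concatenation.
theorem foldl_addK_dedup (gs : List String) :
    ∀ (s : List String),
      gs.foldl (fun K g => if g ∈ K then K else K ++ [g]) (PySem.List.dedup s) =
      PySem.List.dedup (s ++ gs) := by
  induction gs with
  | nil => intro s; simp
  | cons g rest ih =>
    intro s
    simp only [List.foldl_cons]
    have h1 : (if g ∈ PySem.List.dedup s then PySem.List.dedup s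
               else PySem.List.dedup s ++ [g]) = PySem.List.dedup (s ++ [g]) := by
      rw [dedup_append_singleton]
      by_cases h : g ∈ s <;> simp [h]
    rw [h1, ih]
    simp

-- Invariant of A's outer fold: keys are the dedup'd flattened genes, values are module columns.
theorem outer_inv (gmt : List (String × List String))
    (hnd : (gmt.map Prod.fst).Nodup) :
    ∀ (l pre : List (String × List String)), gmt = pre ++ l →
    ∀ (d : PySem.Dict String (List String)),
      d.keys = PySem.List.dedup (pre.flatMap (fun p => p.2)) →
      (∀ x, d.getD x [] = (pre.filter (fun p => p.2.contains x)).map (fun p => p.1)) →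
      ((l.foldl
          (fun d p =>
            ((List.lookup p.1 gmt).getD []).foldl
              (fun d gene =>
                if d.contains gene = false then d.insert gene [p.1]
                else if p.1 ∉ d.getD gene [] then d.modify gene [] (fun v => v ++ [p.1])
                else d) d) d).keys =
        PySem.List.dedup (gmt.flatMap (fun p => p.2)) ∧
       ∀ x, (l.foldl
          (fun d p =>
            ((List.lookup p.1 gmt).getD []).foldl
              (fun d gene =>
                if d.contains gene = false then d.insert gene [p.1]
                else if p.1 ∉ d.getD gene [] then d.modify gene [] (fun v => v ++ [p.1])
                else d) d) d).getD x [] =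
        (gmt.filter (fun p => p.2.contains x)).map (fun p => p.1)) := by
  intro l
  induction l with
  | nil =>
    intro pre hpre d hk hv
    subst hpre
    simp only [List.foldl_nil, List.append_nil]
    exact ⟨hk, hv⟩
  | cons p rest ih =>
    intro pre hpre d hk hv
    have hp : p ∈ gmt := by rw [hpre]; exact List.mem_append_right _ (List.mem_cons_self ..)
    have hlook : List.lookup p.1 gmt = some p.2 := lookup_self_of_nodup hnd hp
    simp only [List.foldl_cons, hlook, Option.getD_some]
    -- p.1 is a fresh module name: not among the first components of pre
    have hfresh : p.1 ∉ pre.map Prod.fst := by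
      have h := hpre ▸ hnd
      rw [List.map_append, List.nodup_append] at h
      intro hmem
      exact h.2.2 _ hmem _ (by simp) rfl
    -- hence p.1 is in no value of d
    have hnotin : ∀ x, p.1 ∉ d.getD x [] := by
      intro x hmem
      rw [hv x] at hmem
      rcases List.mem_map.mp hmem with ⟨q, hq, hq1⟩
      exact hfresh (hq1 ▸ List.mem_map_of_mem (List.mem_of_mem_filter hq))
    set d1 := p.2.foldl
        (fun d gene =>
          if d.contains gene = false then d.insert gene [p.1]
          else if p.1 ∉ d.getD gene [] then d.modify gene [] (fun v => v ++ [p.1])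
          else d) d with hd1
    have hk1 : d1.keys = PySem.List.dedup ((pre ++ [p]).flatMap (fun p => p.2)) := by
      rw [hd1, inner_keys, hk, foldl_addK_dedup]
      simp
    have hv1 : ∀ x, d1.getD x [] =
        ((pre ++ [p]).filter (fun p => p.2.contains x)).map (fun p => p.1) := by
      intro x
      rw [hd1, inner_getD, List.filter_append, List.map_append, ← hv x]
      by_cases hx : x ∈ p.2
      · rw [if_pos ⟨hx, hnotin x⟩]
        simp [List.filter, hx]
      · rw [if_neg (by simp [hx])]
        simp [List.filter, hx]
    exact ih (pre ++ [p]) (by rw [hpre]; simp) d1 hk1 hv1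

-- filtering the precomputed (module, gene-set) list by set membership picks the same
-- module column as filtering the original list by list membership.
theorem filter_map_sets (gmt : List (String × List String)) (g : String) :
    (((gmt.map (fun p => (p.1, PySem.Set.ofList p.2))).filter
        (fun q => q.2.contains g)).map (fun q => q.1)) =
    ((gmt.filter (fun p => p.2.contains g)).map (fun p => p.1)) := by
  induction gmt with
  | nil => rfl
  | cons p rest ih =>
    by_cases h : g ∈ p.2 <;>
      · simp [PySem.Set.contains, PySem.Set.mem_ofList, h]
        simpa [PySem.Set.contains, PySem.Set.mem_ofList] using ih

-- B's port, with the set precomputation folded away.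
theorem alt_eq (gmt : List (String × List String)) :
    Get_genes_modules_gmt_alt gmt =
    (PySem.List.dedup (gmt.flatMap (fun p => p.2))).map
      (fun g => (g, (gmt.filter (fun p => p.2.contains g)).map (fun p => p.1))) := by
  unfold Get_genes_modules_gmt_alt
  simp only [filter_map_sets]

-- ===== VERDICT (by name: the statement is the Claim_ definition above) =====
theorem Get_genes_modules_gmt_spec : Claim_equal_Get_genes_modules_gmt := by
  intro gmt_dict _ hpre
  unfold Spec_Get_genes_modules_gmt Get_genes_modules_gmt
  rw [alt_eq]
  obtain ⟨hk, hv⟩ := outer_inv gmt_dict hpre gmt_dict [] rfl PySem.Dict.empty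
    (by simp [PySem.Dict.keys_empty, PySem.List.dedup_eq_ofList, PySem.Set.ofList_nil])
    (fun x => by simp [PySem.Dict.getD_empty])
  have hndk : (PySem.List.dedup (gmt_dict.flatMap (fun p => p.2))).Nodup := by
    rw [PySem.List.dedup_eq_ofList]; exact PySem.Set.nodup_ofList _
  rw [PySem.Dict.items_eq_map_keys _ (hk ▸ hndk) ([] : List String), hk]
  exact List.map_congr_left (fun k _ => congrArg (Prod.mk k) (hv k))
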